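-- pv_equiv track=rewrite | github.com/aaronforge/python-algorithm | 11-6.py | solution
-- ===== SOURCE A (Python) =====
-- import heapq
--
-- def solution(food: list[int], k: int):
--     if sum(food) <= k:
--         return -1
--
--     queue = []
--
--     for i, time in enumerate(food):
--         heapq.heappush(queue, (time, i + 1))
--
--     # 총 걸린 시간
--     total_time = 0
--
--     # 이전 단계 까지 시간
--     prev_time = 0
--
--     # 음식 수
--     food_count = len(food)
--
--     while queue:
--         t, _ = queue[0]
--         cost = (t - prev_time) * food_count
--
--         if total_time + cost > k:
--             # 오류 정상화됨
--             break
--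
--         total_time += cost
--         prev_time = t
--
--         heapq.heappop(queue)
--         food_count -= 1
--
--     result = sorted(queue, key=lambda x: x[1])
--     return result[(k - total_time) % food_count][1]
-- ===== SOURCE B (Python) =====
-- def solution(food: list[int], k: int):
--     if sum(food) <= k:
--         return -1
--
--     # binary search on the stop level T: spent(T) = seconds used if every food
--     # is eaten down to level T; find T with spent(T) <= k < spent(T+1)
--     def spent(T):
--         return sum(min(f, T) for f in food)
--
--     lo = min(min(food), k, 0)   # spent(lo) = len(food)*lo <= k
--     hi = max(food)              # spent(hi) = sum(food) > k
--     while lo + 1 < hi: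
--         mid = (lo + hi) // 2
--         if spent(mid) <= k:
--             lo = mid
--         else:
--             hi = mid
--     T = lo
--
--     survivors = [i + 1 for i, f in enumerate(food) if f > T]
--     return survivors[(k - spent(T)) % len(survivors)]
-- ===== Notes on version B (the rewrite author's own statement) =====
-- stated objective: alternative
-- what changed: Replaced the heap/pop simulation entirely by a binary search on the stop level T (with spent(T) = sum(min(f,T))): find T with spent(T) <= k < spent(T+1), then the survivors are simply the foods with f > T taken in original index order (no sort, no heap), and the answer is survivors[(k - spent(T)) % len(survivors)].
-- outside the precondition, e.g. on solution([], -1): A raises ZeroDivisionError, B raises ValueError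
import Mathlib
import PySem

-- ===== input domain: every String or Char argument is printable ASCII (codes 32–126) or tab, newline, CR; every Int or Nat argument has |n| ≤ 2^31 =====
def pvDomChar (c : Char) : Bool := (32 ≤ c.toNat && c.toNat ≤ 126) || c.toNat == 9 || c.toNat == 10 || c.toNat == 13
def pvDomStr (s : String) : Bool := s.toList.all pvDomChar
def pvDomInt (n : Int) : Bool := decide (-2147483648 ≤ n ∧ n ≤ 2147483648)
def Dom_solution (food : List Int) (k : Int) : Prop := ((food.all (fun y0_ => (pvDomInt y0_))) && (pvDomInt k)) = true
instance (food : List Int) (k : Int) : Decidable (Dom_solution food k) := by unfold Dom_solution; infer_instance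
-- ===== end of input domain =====

-- B replaces A's heap simulation by a binary search on the stop level T (objective: alternative algorithm).


-- ===== PORT A =====
-- Python's tuple '<' on (int, int): lexicographic (exact; the components are ints)
def pyTupLt (a b : Int × Int) : Bool := decide (a.1 < b.1 ∨ (a.1 = b.1 ∧ a.2 < b.2))

-- heapq modeled as a list kept in Python-tuple order: heappush = ordered insert, queue[0] = head,
-- heappop = drop the head.  This is exact for A's observable behaviour: heapq pops items in
-- increasing tuple order (all tuples here are distinct in their second component), and A's final
-- 'sorted(queue, key=lambda x: x[1])' depends only on the multiset of the remaining items.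
def heapPush (q : List (Int × Int)) (x : Int × Int) : List (Int × Int) :=
  PySem.List.insertBy pyTupLt x q

-- the 'while queue:' loop; state (queue, total_time, prev_time, food_count)
def solLoop (queue : List (Int × Int)) (k : Int) (total prev cnt : Int) :
    List (Int × Int) × Int × Int :=
  match queue with
  | [] => ([], total, cnt)
  | (t, i) :: rest =>
    let cost := (t - prev) * cnt
    if total + cost > k then ((t, i) :: rest, total, cnt)
    else solLoop rest k (total + cost) t (cnt - 1)

def solution (food : List Int) (k : Int) : Int :=
  if food.sum ≤ k then -1
  else
    let queue := (PySem.List.enumerate food 0).foldl (fun q p => heapPush q (p.2, p.1 + 1)) []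
    let r := solLoop queue k 0 0 (food.length : Int)
    let result := PySem.List.sorted r.1 (fun x => x.2)
    (PySem.List.pyGetD result (PySem.Int.mod (k - r.2.1) r.2.2) (0, 0)).2

-- ===== PORT B =====
-- spent(T) = sum(min(f, T) for f in food)
def spentS (food : List Int) (T : Int) : Int := (food.map (fun f => min f T)).sum

-- the 'while lo + 1 < hi:' binary-search loop of Source B
def bsLoop (food : List Int) (k lo hi : Int) : Int :=
  if lo + 1 < hi then
    let mid := PySem.Int.floordiv (lo + hi) 2
    if spentS food mid ≤ k then bsLoop food k mid hi else bsLoop food k lo mid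
  else lo
termination_by (hi - lo).toNat
decreasing_by
  · have h1 : lo + 1 ≤ PySem.Int.floordiv (lo + hi) 2 :=
      (PySem.Int.le_floordiv_iff_mul_le (by omega)).mpr (by omega)
    omega
  · have h2 : PySem.Int.floordiv (lo + hi) 2 < hi :=
      (PySem.Int.floordiv_lt_iff_lt_mul (by omega)).mpr (by omega)
    omega

def solution_alt (food : List Int) (k : Int) : Int :=
  if food.sum ≤ k then -1
  else
    let lo := min (min ((PySem.List.min? food (fun x => x)).getD 0) k) 0
    let hi := (PySem.List.max? food (fun x => x)).getD 0
    let T := bsLoop food k lo hi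
    let survivors :=
      ((PySem.List.enumerate food 0).filter (fun p => decide (p.2 > T))).map (fun p => p.1 + 1)
    PySem.List.pyGetD survivors (PySem.Int.mod (k - spentS food T) (survivors.length : Int)) 0

-- ===== PRECONDITION & SPEC =====
-- Pre_ excludes only food = [] with sum(food) > k (i.e. k < 0), on which A raises ZeroDivisionError (and B ValueError).
def Pre_solution (food : List Int) (k : Int) : Prop := food ≠ [] ∨ food.sum ≤ k
instance (food : List Int) (k : Int) : Decidable (Pre_solution food k) := by
  unfold Pre_solution; infer_instance
def pvWitness_solution : List Int × Int := ([3, 1, 2], 5)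

def Spec_solution (food : List Int) (k : Int) (out : Int) : Prop := out = solution_alt food k
instance (food : List Int) (k : Int) (out : Int) : Decidable (Spec_solution food k out) := by
  unfold Spec_solution; infer_instance

-- ===== CLAIM (what is proved, stated in full; the proofs are below) =====
def Claim_equal_solution : Prop :=
  ∀ (food : List Int) (k : Int), Dom_solution food k → Pre_solution food k →
    Spec_solution food k (solution food k)

-- ===== LEMMAS AND PROOFS =====

-- A's heap-order comparison coincides with the comparison sorted2 uses
theorem pyTupLt_eq_sorted2_lt :
    pyTupLt = fun a b : Int × Int =>
      decide (a.1 < b.1) || (!decide (b.1 < a.1) && decide (a.2 < b.2)) := by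
  funext a b
  by_cases h1 : a.1 < b.1 <;> by_cases h2 : b.1 < a.1 <;> by_cases h3 : a.2 < b.2 <;>
    simp [pyTupLt, h1, h2, h3] <;> omega

-- A's queue after all pushes is exactly the sorted list of (time, index) pairs
theorem queue_eq_order (food : List Int) :
    (PySem.List.enumerate food 0).foldl (fun q p => heapPush q (p.2, p.1 + 1)) [] =
      PySem.List.sorted2 ((PySem.List.enumerate food 0).map (fun p => (p.2, p.1 + 1)))
        (fun x => x.1) (fun x => x.2) := by
  unfold PySem.List.sorted2
  rw [List.foldl_map]
  simp only [heapPush, pyTupLt_eq_sorted2_lt, if_neg (by decide : ¬ (false = true))]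

-- proof-only cursor form of A's loop: index j into the sorted list instead of popping
def altLoop (order : List (Int × Int)) (k n : Int) (j : Nat) (total prev : Int) : Nat × Int :=
  match _h : order[j]? with
  | none => (j, total)
  | some p =>
    let cost := (p.1 - prev) * (n - (j : Int))
    if total + cost > k then (j, total)
    else altLoop order k n (j + 1) (total + cost) p.1
termination_by order.length - j
decreasing_by
  have hj : j < order.length := (List.getElem?_eq_some_iff.mp _h).1
  omega

-- loop correspondence: A's pop loop on the suffix = the cursor loop
theorem loop_corr (order : List (Int × Int)) (k : Int) :
    ∀ (j : Nat) (total prev : Int), j ≤ order.length →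
      solLoop (order.drop j) k total prev ((order.length : Int) - (j : Int)) =
        ((order.drop (altLoop order k (order.length : Int) j total prev).1),
          (altLoop order k (order.length : Int) j total prev).2,
          ((order.length : Int) - ((altLoop order k (order.length : Int) j total prev).1 : Int))) := by
  intro j total prev hj
  induction hn : order.length - j generalizing j total prev with
  | zero =>
    have hjl : j = order.length := by omega
    have hnone : order[j]? = none := by
      rw [List.getElem?_eq_none_iff]; omega
    rw [altLoop, hnone]
    simp [List.drop_eq_nil_of_le (by omega : order.length ≤ j), solLoop]
  | succ m ih =>
    have hjl : j < order.length := by omega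
    have hsome : order[j]? = some order[j] := List.getElem?_eq_some_iff.mpr ⟨hjl, rfl⟩
    have hdrop : order.drop j = order[j] :: order.drop (j + 1) :=
      List.drop_eq_getElem_cons hjl
    rw [altLoop, hsome]
    simp only
    rw [hdrop]
    rcases hp : order[j] with ⟨t, i⟩
    simp only [solLoop]
    by_cases hbr : total + (t - prev) * ((order.length : Int) - (j : Int)) > k
    · simp only [hbr, ite_true]
      rw [← hp, ← hdrop]
    · have hbr' : ¬ (total + (t - prev) * ((order.length : Int) - (j : Int)) > k) := hbr
      simp only [if_neg hbr']
      have := ih (j + 1) (total + (t - prev) * ((order.length : Int) - (j : Int))) t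
        (by omega) (by omega)
      have harith : (order.length : Int) - (j : Int) - 1 =
          (order.length : Int) - ((j : Nat) + 1 : Nat) := by push_cast; ring
      rw [harith, this]

-- spent over a pair list, keyed by the first component
def spentL (l : List (Int × Int)) (T : Int) : Int := (l.map (fun p => min p.1 T)).sum

theorem spentL_mono (l : List (Int × Int)) {T1 T2 : Int} (h : T1 ≤ T2) :
    spentL l T1 ≤ spentL l T2 := by
  unfold spentL
  induction l with
  | nil => simp
  | cons x xs ih => simp only [List.map_cons, List.sum_cons]; have := min_le_min_left x.1 h; omega

theorem spentS_eq_spentL (food : List Int) (order : List (Int × Int)) (T : Int)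
    (hperm : order.Perm ((PySem.List.enumerate food 0).map (fun p => (p.2, p.1 + 1)))) :
    spentS food T = spentL order T := by
  unfold spentS spentL
  rw [(hperm.map (fun p => min p.1 T)).sum_eq, List.map_map]
  have h2 : ((fun p : Int × Int => min p.1 T) ∘ fun p : Int × Int => (p.2, p.1 + 1))
      = (fun f => min f T) ∘ (fun p : Int × Int => p.2) := rfl
  rw [h2, ← List.map_map, PySem.List.map_snd_enumerate]

theorem spentL_of_ge (l : List (Int × Int)) (x : Int) (h : ∀ p ∈ l, x ≤ p.1) :
    spentL l x = (l.length : Int) * x := by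
  unfold spentL
  induction l with
  | nil => simp
  | cons p t ih =>
    rw [List.map_cons, List.sum_cons, ih (fun q hq => h q (List.mem_cons_of_mem _ hq)),
      min_eq_right (h p (List.mem_cons_self))]
    rw [List.length_cons]; push_cast; ring

theorem spentL_of_le (l : List (Int × Int)) (x : Int) (h : ∀ p ∈ l, p.1 ≤ x) :
    spentL l x = (l.map (fun p => p.1)).sum := by
  unfold spentL
  induction l with
  | nil => simp
  | cons p t ih =>
    rw [List.map_cons, List.sum_cons, ih (fun q hq => h q (List.mem_cons_of_mem _ hq)),
      min_eq_left (h p (List.mem_cons_self)), List.map_cons, List.sum_cons]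

theorem spentL_append (l1 l2 : List (Int × Int)) (x : Int) :
    spentL (l1 ++ l2) x = spentL l1 x + spentL l2 x := by
  unfold spentL; rw [List.map_append, List.sum_append]

theorem spentL_diff (l : List (Int × Int)) (x y : Int) (c : Nat) (hc : c ≤ l.length)
    (hlow : ∀ (i : Nat) (h : i < l.length), i < c → (l[i]).1 ≤ x ∧ (l[i]).1 ≤ y)
    (hhigh : ∀ (i : Nat) (h : i < l.length), c ≤ i → x ≤ (l[i]).1 ∧ y ≤ (l[i]).1) :
    spentL l y - spentL l x = ((l.length : Int) - (c : Int)) * (y - x) := by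
  have hsplit : l = l.take c ++ l.drop c := (List.take_append_drop c l).symm
  have htlen : (l.take c).length = c := by rw [List.length_take]; omega
  have hmemt : ∀ p ∈ l.take c, p.1 ≤ x ∧ p.1 ≤ y := by
    intro p hp
    obtain ⟨i, hi, rfl⟩ := List.mem_iff_getElem.mp hp
    rw [List.getElem_take]
    exact hlow i (by omega) (by omega)
  have hmemd : ∀ p ∈ l.drop c, x ≤ p.1 ∧ y ≤ p.1 := by
    intro p hp
    obtain ⟨i, hi, rfl⟩ := List.mem_iff_getElem.mp hp
    rw [List.getElem_drop]
    exact hhigh (c + i) (by rw [List.length_drop] at hi; omega) (by omega)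
  rw [hsplit, spentL_append, spentL_append,
    spentL_of_le _ x (fun p hp => (hmemt p hp).1), spentL_of_le _ y (fun p hp => (hmemt p hp).2),
    spentL_of_ge _ x (fun p hp => (hmemd p hp).1), spentL_of_ge _ y (fun p hp => (hmemd p hp).2)]
  rw [List.length_append, List.length_drop, htlen]
  have : ((c + (l.length - c) : Nat) : Int) - (c : Int) = ((l.length - c : Nat) : Int) := by
    push_cast; omega
  rw [this]
  ring

-- comparator used by sorted2 on (time, index) pairs, and sortedness of its output
def lexCmp (a b : Int × Int) : Bool :=
  decide (a.1 < b.1) || (!decide (b.1 < a.1) && decide (a.2 < b.2))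

theorem lexCmp_trans {a b c : Int × Int} (h1 : lexCmp b a = false) (h2 : lexCmp c b = false) :
    lexCmp c a = false := by
  simp only [lexCmp, Bool.or_eq_false_iff, Bool.and_eq_false_iff, Bool.not_eq_false',
    decide_eq_false_iff_not, decide_eq_true_eq] at *
  omega

theorem lexCmp_asymm {a b : Int × Int} (h : lexCmp a b = true) : lexCmp b a = false := by
  simp only [lexCmp, Bool.or_eq_true, Bool.and_eq_true, Bool.not_eq_true',
    decide_eq_false_iff_not, decide_eq_true_eq, Bool.or_eq_false_iff, Bool.and_eq_false_iff,
    Bool.not_eq_false'] at *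
  omega

theorem insertBy_lex_pairwise (x : Int × Int) (ys : List (Int × Int))
    (h : ys.Pairwise (fun a b => lexCmp b a = false)) :
    (PySem.List.insertBy lexCmp x ys).Pairwise (fun a b => lexCmp b a = false) := by
  induction ys with
  | nil => simp [PySem.List.insertBy]
  | cons y ys ih =>
    rw [List.pairwise_cons] at h
    by_cases hc : lexCmp x y = true
    · rw [PySem.List.insertBy, if_pos hc]
      refine List.Pairwise.cons (fun z hz => ?_) (List.pairwise_cons.mpr h)
      rcases List.mem_cons.mp hz with rfl | hz'
      · exact lexCmp_asymm hc
      · exact lexCmp_trans (lexCmp_asymm hc) (h.1 z hz')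
    · rw [PySem.List.insertBy, if_neg hc]
      refine List.Pairwise.cons (fun z hz => ?_) (ih h.2)
      rcases (PySem.List.mem_insertBy lexCmp x z ys).mp hz with rfl | hz'
      · exact Bool.eq_false_iff.mpr hc
      · exact h.1 z hz'

theorem foldl_insertBy_lex_pairwise (l : List (Int × Int)) :
    ∀ acc : List (Int × Int), acc.Pairwise (fun a b => lexCmp b a = false) →
      (l.foldl (fun acc x => PySem.List.insertBy lexCmp x acc) acc).Pairwise
        (fun a b => lexCmp b a = false) := by
  induction l with
  | nil => intro acc h; exact h
  | cons x l ih => intro acc h; exact ih _ (insertBy_lex_pairwise x acc h)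

theorem sorted2_pairwise_fst (E : List (Int × Int)) :
    (PySem.List.sorted2 E (fun x => x.1) (fun x => x.2)).Pairwise
      (fun a b => a.1 ≤ b.1) := by
  have heq : PySem.List.sorted2 E (fun x => x.1) (fun x => x.2) =
      E.foldl (fun acc x => PySem.List.insertBy lexCmp x acc) [] := rfl
  rw [heq]
  refine (foldl_insertBy_lex_pairwise E [] (by simp)).imp ?_
  intro a b hab
  simp only [lexCmp, Bool.or_eq_false_iff, Bool.and_eq_false_iff, Bool.not_eq_false',
    decide_eq_false_iff_not, decide_eq_true_eq] at hab
  omega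

-- a list whose first c positions fail Q and whose rest satisfy Q filters to its drop
theorem filter_eq_drop (Q : Int × Int → Bool) (l : List (Int × Int)) (c : Nat) (hc : c ≤ l.length)
    (hlow : ∀ (i : Nat) (h : i < l.length), i < c → Q (l[i]) = false)
    (hhigh : ∀ (i : Nat) (h : i < l.length), c ≤ i → Q (l[i]) = true) :
    l.filter Q = l.drop c := by
  conv_lhs => rw [← List.take_append_drop c l]
  rw [List.filter_append]
  have h1 : (l.take c).filter Q = [] := by
    rw [List.filter_eq_nil_iff]
    intro a ha
    obtain ⟨i, hi, rfl⟩ := List.mem_iff_getElem.mp ha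
    rw [List.getElem_take]
    rw [List.length_take] at hi
    exact Bool.eq_false_iff.mp (hlow i (by omega) (by omega))
  have h2 : (l.drop c).filter Q = l.drop c := by
    rw [List.filter_eq_self]
    intro a ha
    obtain ⟨i, hi, rfl⟩ := List.mem_iff_getElem.mp ha
    rw [List.getElem_drop]
    rw [List.length_drop] at hi
    exact hhigh (c + i) (by omega) (by omega)
  rw [h1, h2, List.nil_append]

-- binary-search correctness: bsLoop returns T with spent(T) ≤ k < spent(T+1)
theorem bsLoop_spec (food : List Int) (k : Int) :
    ∀ (n : Nat) (lo hi : Int), (hi - lo).toNat ≤ n → lo < hi →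
      spentS food lo ≤ k → k < spentS food hi →
      spentS food (bsLoop food k lo hi) ≤ k ∧ k < spentS food (bsLoop food k lo hi + 1) := by
  intro n
  induction n with
  | zero => intro lo hi h1 h2 _ _; omega
  | succ n ih =>
    intro lo hi hle hlt hlo hhi
    rw [bsLoop]
    by_cases hc : lo + 1 < hi
    · simp only [hc, if_true]
      have hm1 : lo + 1 ≤ PySem.Int.floordiv (lo + hi) 2 :=
        (PySem.Int.le_floordiv_iff_mul_le (by omega)).mpr (by omega)
      have hm2 : PySem.Int.floordiv (lo + hi) 2 < hi :=
        (PySem.Int.floordiv_lt_iff_lt_mul (by omega)).mpr (by omega)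
      by_cases hs : spentS food (PySem.Int.floordiv (lo + hi) 2) ≤ k
      · simp only [hs, if_true]
        exact ih _ _ (by omega) (by omega) hs hhi
      · simp only [hs, if_false]
        exact ih _ _ (by omega) (by omega) hlo (by omega)
    · simp only [hc, if_false]
      have : hi = lo + 1 := by omega
      exact ⟨hlo, by rw [← this]; exact hhi⟩

-- cursor-loop characterization in terms of the stop level T
theorem altLoop_spec (order : List (Int × Int)) (k T : Int)
    (hmono : ∀ (i1 i2 : Nat) (h1 : i1 < order.length) (h2 : i2 < order.length),
      i1 ≤ i2 → (order[i1]).1 ≤ (order[i2]).1)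
    (hT1 : spentL order T ≤ k) (hT2 : k < spentL order (T + 1)) :
    ∀ (j : Nat) (total prev : Int), j ≤ order.length →
      ((j = 0 ∧ total = 0 ∧ prev = 0) ∨
        (∃ h : j - 1 < order.length, 1 ≤ j ∧ prev = (order[j - 1]).1 ∧
          total = spentL order prev ∧ prev ≤ T)) →
      (∃ i, ∃ h : i < order.length, j ≤ i ∧ k < spentL order ((order[i]).1)) →
      ((altLoop order k (order.length : Int) j total prev).1 < order.length ∧
       j ≤ (altLoop order k (order.length : Int) j total prev).1 ∧
       (∀ (i : Nat) (h : i < order.length), j ≤ i →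
         i < (altLoop order k (order.length : Int) j total prev).1 → (order[i]).1 ≤ T) ∧
       (∀ (i : Nat) (h : i < order.length),
         (altLoop order k (order.length : Int) j total prev).1 ≤ i → T < (order[i]).1) ∧
       ((order.length : Int) - ((altLoop order k (order.length : Int) j total prev).1 : Int)) ∣
         (spentL order T - (altLoop order k (order.length : Int) j total prev).2)) := by
  intro j total prev hj hinv hbig
  induction hn : order.length - j generalizing j total prev with
  | zero =>
    obtain ⟨i, hi, hji, _⟩ := hbig
    omega
  | succ m ih =>
    have hjl : j < order.length := by
      obtain ⟨i, hi, hji, _⟩ := hbig; omega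
    have hsome : order[j]? = some order[j] := List.getElem?_eq_some_iff.mpr ⟨hjl, rfl⟩
    rw [altLoop, hsome]
    simp only
    -- the probed test value equals spentL at the head's time
    have hstep : total + ((order[j]).1 - prev) * ((order.length : Int) - (j : Int)) =
        spentL order ((order[j]).1) := by
      rcases hinv with ⟨hj0, htot0, hprev0⟩ | ⟨hjm, hj1, hprev, htot, hpT⟩
      · subst hj0; subst htot0; subst hprev0
        rw [spentL_of_ge order _ (fun p hp => ?_)]
        · push_cast; ring
        · obtain ⟨i, hi, rfl⟩ := List.mem_iff_getElem.mp hp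
          exact hmono 0 i hjl hi (by omega)
      · have hd := spentL_diff order prev ((order[j]).1) j (le_of_lt hjl)
          (fun i hi hic => ⟨hprev ▸ hmono i (j - 1) hi hjm (by omega),
            hmono i j hi hjl (by omega)⟩)
          (fun i hi hic => ⟨hprev ▸ hmono (j - 1) i hjm hi (by omega),
            hmono j i hjl hi hic⟩)
        rw [htot]; linarith
    by_cases hbr : total + ((order[j]).1 - prev) * ((order.length : Int) - (j : Int)) > k
    · rw [if_pos hbr]
      have hTgt : ∀ (i : Nat) (h : i < order.length), j ≤ i → T < (order[i]).1 := by
        intro i hi hji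
        have hTj : T < (order[j]).1 := by
          by_contra hle
          push Not at hle
          have := spentL_mono order hle
          omega
        exact lt_of_lt_of_le hTj (hmono j i hjl hi hji)
      refine ⟨hjl, le_refl _, fun i hi h1 h2 => absurd h2 (by omega), hTgt, ?_⟩
      rcases hinv with ⟨hj0, htot0, hprev0⟩ | ⟨hjm, hj1, hprev, htot, hpT⟩
      · subst hj0; subst htot0
        refine ⟨T, ?_⟩
        rw [spentL_of_ge order T (fun p hp => ?_)]
        · push_cast; ring
        · obtain ⟨i, hi, rfl⟩ := List.mem_iff_getElem.mp hp
          exact le_of_lt (hTgt i hi (by omega))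
      · have hd := spentL_diff order prev T j (le_of_lt hjl)
          (fun i hi hic => ⟨hprev ▸ hmono i (j - 1) hi hjm (by omega),
            le_trans (hprev ▸ hmono i (j - 1) hi hjm (by omega)) hpT⟩)
          (fun i hi hic => ⟨hprev ▸ hmono (j - 1) i hjm hi (by omega),
            le_of_lt (hTgt i hi hic)⟩)
        exact ⟨T - prev, by rw [htot]; linarith⟩
    · rw [if_neg hbr]
      push Not at hbr
      have hjT : (order[j]).1 ≤ T := by
        by_contra hgt
        push Not at hgt
        have := spentL_mono order (by omega : T + 1 ≤ (order[j]).1)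
        omega
      obtain ⟨i, hi, hji, hik⟩ := hbig
      have hij : j + 1 ≤ i := by
        rcases Nat.eq_or_lt_of_le hji with rfl | h
        · omega
        · omega
      have IH := ih (j + 1) (total + ((order[j]).1 - prev) * ((order.length : Int) - (j : Int)))
        ((order[j]).1) (by omega)
        (Or.inr ⟨by simpa using hjl, by omega, by simp, by rw [hstep], hjT⟩)
        ⟨i, hi, hij, hik⟩ (by omega)
      refine ⟨IH.1, by omega, fun i2 hi2 h1 h2 => ?_, IH.2.2.2.1, IH.2.2.2.2⟩
      rcases Nat.eq_or_lt_of_le h1 with rfl | h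
      · exact hjT
      · exact IH.2.2.1 i2 hi2 (by omega) h2

theorem spentS_of_ge (food : List Int) (x : Int) (h : ∀ f ∈ food, x ≤ f) :
    spentS food x = (food.length : Int) * x := by
  unfold spentS
  induction food with
  | nil => simp
  | cons f t ih =>
    rw [List.map_cons, List.sum_cons, ih (fun q hq => h q (List.mem_cons_of_mem _ hq)),
      min_eq_right (h f (List.mem_cons_self)), List.length_cons]
    push_cast; ring

theorem spentS_of_le (food : List Int) (x : Int) (h : ∀ f ∈ food, f ≤ x) :
    spentS food x = food.sum := by
  unfold spentS
  induction food with
  | nil => simp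
  | cons f t ih =>
    rw [List.map_cons, List.sum_cons, ih (fun q hq => h q (List.mem_cons_of_mem _ hq)),
      min_eq_left (h f (List.mem_cons_self)), List.sum_cons]

-- ===== VERDICT (by name: the statement is the Claim_ definition above) =====
theorem solution_spec : Claim_equal_solution := by
  intro food k _hdom hpre
  unfold Spec_solution
  by_cases hs : food.sum ≤ k
  · simp [solution, solution_alt, hs]
  · have hne : food ≠ [] := by
      rcases hpre with h | h
      · exact h
      · exact absurd h hs
    obtain ⟨mn, hmn⟩ : ∃ mn, PySem.List.min? food (fun x => x) = some mn := by
      cases h : PySem.List.min? food (fun x => x) with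
      | none => exact absurd (by rwa [PySem.List.min?_eq_none_iff] at h) hne
      | some m => exact ⟨m, rfl⟩
    obtain ⟨mx, hmx⟩ : ∃ mx, PySem.List.max? food (fun x => x) = some mx := by
      cases h : PySem.List.max? food (fun x => x) with
      | none => exact absurd (by rwa [PySem.List.max?_eq_none_iff] at h) hne
      | some m => exact ⟨m, rfl⟩
    simp only [solution, solution_alt, if_neg hs]
    rw [queue_eq_order food, hmn, hmx]
    simp only [Option.getD_some]
    set E := (PySem.List.enumerate food 0).map (fun p : Int × Int => (p.2, p.1 + 1)) with hE_def
    set order := PySem.List.sorted2 E (fun x => x.1) (fun x => x.2) with horder_def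
    set lo := min (min mn k) 0 with hlo_def
    set T := bsLoop food k lo mx with hT_def
    -- facts about lo / hi and the binary search
    have hlo_le_mn : lo ≤ mn := le_trans (min_le_left _ _) (min_le_left _ _)
    have hlo_le_k : lo ≤ k := le_trans (min_le_left _ _) (min_le_right _ _)
    have hlo_le_0 : lo ≤ 0 := min_le_right _ _
    have hmnf : ∀ f ∈ food, mn ≤ f := fun f hf => PySem.List.min?_isMin hmn f hf
    have hmxf : ∀ f ∈ food, f ≤ mx := fun f hf => PySem.List.max?_isMax hmx f hf
    have hn1 : 1 ≤ food.length := List.length_pos_iff.mpr hne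
    have hSlok : spentS food lo ≤ k := by
      rw [spentS_of_ge _ _ (fun f hf => le_trans hlo_le_mn (hmnf f hf))]
      have h1 : ((food.length : Int)) * lo ≤ 1 * lo :=
        mul_le_mul_of_nonpos_right (by exact_mod_cast hn1) hlo_le_0
      linarith
    have hShik : k < spentS food mx := by
      rw [spentS_of_le _ _ hmxf]; omega
    have hlohi : lo < mx := by
      have hle : lo ≤ mx := le_trans hlo_le_mn (hmxf mn (PySem.List.min?_mem hmn))
      rcases eq_or_lt_of_le hle with heq | h
      · rw [heq] at hSlok; omega
      · exact h
    have hT := bsLoop_spec food k ((mx - lo).toNat) lo mx le_rfl hlohi hSlok hShik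
    rw [← hT_def] at hT
    -- facts about the sorted order
    have hperm : order.Perm E := PySem.List.sorted2_perm E _ _ false
    have hlen : order.length = food.length := by
      rw [hperm.length_eq, hE_def, List.length_map, PySem.List.length_enumerate]
    have hmono : ∀ (i1 i2 : Nat) (h1 : i1 < order.length) (h2 : i2 < order.length),
        i1 ≤ i2 → (order[i1]).1 ≤ (order[i2]).1 := by
      intro i1 i2 h1 h2 h
      rcases Nat.eq_or_lt_of_le h with rfl | h'
      · exact le_refl _
      · exact List.pairwise_iff_getElem.mp (sorted2_pairwise_fst E) i1 i2 h1 h2 h'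
    have hTL1 : spentL order T ≤ k := by
      rw [← spentS_eq_spentL food order T hperm]; exact hT.1
    have hTL2 : k < spentL order (T + 1) := by
      rw [← spentS_eq_spentL food order _ hperm]; exact hT.2
    have hfstsum : (order.map (fun p => p.1)).sum = food.sum := by
      rw [(hperm.map (fun p => p.1)).sum_eq, hE_def, List.map_map]
      have h2 : ((fun p : Int × Int => p.1) ∘ fun p : Int × Int => (p.2, p.1 + 1))
          = (fun p : Int × Int => p.2) := rfl
      rw [h2, PySem.List.map_snd_enumerate]
    have hbig : ∃ i, ∃ h : i < order.length, 0 ≤ i ∧ k < spentL order ((order[i]).1) := by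
      have hlpos : 0 < order.length := by omega
      refine ⟨order.length - 1, by omega, by omega, ?_⟩
      have hle : ∀ p ∈ order, p.1 ≤ (order[order.length - 1]).1 := by
        intro p hp
        obtain ⟨i, hi, rfl⟩ := List.mem_iff_getElem.mp hp
        exact hmono i (order.length - 1) hi (by omega) (by omega)
      rw [spentL_of_le order _ hle, hfstsum]; omega
    have main := altLoop_spec order k T hmono hTL1 hTL2 0 0 0 (Nat.zero_le _)
      (Or.inl ⟨rfl, rfl, rfl⟩) hbig
    set jf := (altLoop order k ((order.length : Int)) 0 0 0).1 with hjf_def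
    set totalf := (altLoop order k ((order.length : Int)) 0 0 0).2 with htf_def
    obtain ⟨hjf_lt, -, hlowT, hhighT, hdvd⟩ := main
    -- A's loop result
    have hcorr := loop_corr order k 0 0 0 (Nat.zero_le _)
    simp only [List.drop_zero, Nat.cast_zero, sub_zero, ← hjf_def, ← htf_def] at hcorr
    have hsol : solLoop order k 0 0 ((food.length : Int)) =
        (order.drop jf, totalf, (order.length : Int) - (jf : Int)) := by
      rw [← hlen]; exact hcorr
    have hr1 : (solLoop order k 0 0 ((food.length : Int))).1 = order.drop jf := by
      rw [hsol]
    have hr2 : (solLoop order k 0 0 ((food.length : Int))).2.1 = totalf := by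
      rw [hsol]
    have hr3 : (solLoop order k 0 0 ((food.length : Int))).2.2 =
        (order.length : Int) - (jf : Int) := by
      rw [hsol]
    rw [hr1, hr2, hr3]
    -- survivors
    set Q := fun p : Int × Int => decide (p.1 > T) with hQ_def
    have hfil : order.filter Q = order.drop jf := by
      refine filter_eq_drop Q order jf (le_of_lt hjf_lt) ?_ ?_
      · intro i hi hic
        have := hlowT i hi (Nat.zero_le _) hic
        simp only [hQ_def, decide_eq_false_iff_not, gt_iff_lt, not_lt]
        exact this
      · intro i hi hic
        have := hhighT i hi hic
        simp only [hQ_def, decide_eq_true_eq, gt_iff_lt]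
        exact this
    set W := E.filter Q with hW_def
    have hWperm : W.Perm (order.drop jf) := by
      rw [← hfil]; exact (hperm.filter Q).symm
    have hWpair : W.Pairwise (fun a b => a.2 < b.2) := by
      refine List.Pairwise.filter Q ?_
      rw [hE_def]
      exact (PySem.List.pairwise_lt_enumerate food 0).map _
        (fun a b hab => by simpa using by omega : _)
    have hsorted_eq : PySem.List.sorted (order.drop jf) (fun x => x.2) = W :=
      PySem.List.sorted_eq_of_perm_of_pairwise_lt _ _ _ hWperm hWpair
    have hWlen : (W.length : Int) = (order.length : Int) - (jf : Int) := by
      rw [hWperm.length_eq, List.length_drop]; omega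
    have hmpos : 0 < (order.length : Int) - (jf : Int) := by
      have h1 : jf < order.length := hjf_lt
      omega
    have hsurv : ((PySem.List.enumerate food 0).filter (fun p => decide (p.2 > T))).map
        (fun p => p.1 + 1) = W.map (fun x => x.2) := by
      rw [hW_def, hE_def, List.filter_map, List.map_map]
      rfl
    have hmodeq : PySem.Int.mod (k - totalf) ((order.length : Int) - (jf : Int)) =
        PySem.Int.mod (k - spentS food T) ((order.length : Int) - (jf : Int)) := by
      rw [PySem.Int.mod_eq_emod_of_pos hmpos, PySem.Int.mod_eq_emod_of_pos hmpos]
      have h1 : spentS food T = spentL order T := spentS_eq_spentL food order T hperm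
      have h2 : ((order.length : Int) - (jf : Int)) ∣ ((k - spentS food T) - (k - totalf)) := by
        rw [h1]
        obtain ⟨c, hc⟩ := hdvd
        refine ⟨-c, ?_⟩
        rw [mul_neg, ← hc]
        ring
      exact Int.modEq_iff_dvd.mpr h2
    simp only [show bsLoop food k (min (min mn k) 0) mx = T from rfl]
    rw [hsorted_eq, hsurv, hmodeq, List.length_map, hWlen]
    have hidx0 : 0 ≤ PySem.Int.mod (k - spentS food T) ((order.length : Int) - (jf : Int)) :=
      PySem.Int.mod_nonneg _ hmpos
    have hidxW : PySem.Int.mod (k - spentS food T) ((order.length : Int) - (jf : Int)) <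
        (W.length : Int) := by
      rw [hWlen]; exact PySem.Int.mod_lt _ hmpos
    rw [PySem.List.pyGetD_eq_getElem W (0, 0) hidx0 hidxW,
      PySem.List.pyGetD_eq_getElem (W.map (fun x => x.2)) 0 hidx0 (by
        rw [List.length_map]; exact hidxW)]
    rw [List.getElem_map]
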